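-- pv_equiv track=rewrite | github.com/SachinChougule10/DSA-in-Python | Binary Search/03_Problems/01_Easy/02_Ceil The Floor/02_Unsorted Array/01_optimal_solution.py | ceil_the_floor
-- ===== SOURCE A (Python) =====
-- def ceil_the_floor(nums: list[int], target: int) -> int:
--     n = len(nums)
--     # Initialize floor and ceil as -1
--     floor = -1  # largest value <= target found so far
--     ceil = -1  # smallest value >= target found so far
--
--     # Traverse each element in the array
--     for num in nums:
--         # Check for floor condition
--         if num <= target:
--             # Update floor if: 1) floor is not set yet, 2)current number is greater than previous floor
--             if floor == -1 or num > floor: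
--                 floor = num
--
--         # Check for ceil condition
--         if num >= target:
--             # Update ceil if: 1) ceil is not set yet, 2) current number is smaller than previous ceil
--             if ceil == -1 or num < ceil:
--                 ceil = num
--
--     # Return floor and ceil as a list
--     return [floor, ceil]
-- ===== SOURCE B (Python) =====
-- def ceil_the_floor(nums: list[int], target: int) -> int:
--     # Sort once, then locate the floor/ceil positions with two binary searches.
--     s = sorted(nums)
--     n = len(s)
--     # bisect_left: first index with s[i] >= target
--     lo, hi = 0, n
--     while lo < hi:
--         mid = (lo + hi) // 2
--         if s[mid] < target:
--             lo = mid + 1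
--         else:
--             hi = mid
--     ceil = s[lo] if lo < n else -1
--     # bisect_right: first index with s[i] > target
--     lo2, hi2 = 0, n
--     while lo2 < hi2:
--         mid = (lo2 + hi2) // 2
--         if s[mid] <= target:
--             lo2 = mid + 1
--         else:
--             hi2 = mid
--     floor = s[lo2 - 1] if lo2 > 0 else -1
--     return [floor, ceil]
-- ===== Notes on version B (the rewrite author's own statement) =====
-- stated objective: alternative
-- what changed: Replaces the fused single-pass conditional-update loop with sort-then-binary-search: sort the array once, then locate the ceil (first element >= target) and the floor (last element <= target) with two hand-written bisect_left/bisect_right loops, with -1 only when the respective side is empty.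
-- intended difference: On arrays containing -1 whose elements after the last -1 go strictly past -1 towards target's far side while no element lies strictly between -1 and target, A confuses the value -1 with its unset sentinel and returns a stale extreme (e.g. A([-1,-2],0)=[-2,-1]), while B returns the true floor/ceil ([-1,-1]), which is the intended value. — e.g. on ceil_the_floor([-1, -2], 0): A returns [-2, -1], B returns [-1, -1]
import Mathlib
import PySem

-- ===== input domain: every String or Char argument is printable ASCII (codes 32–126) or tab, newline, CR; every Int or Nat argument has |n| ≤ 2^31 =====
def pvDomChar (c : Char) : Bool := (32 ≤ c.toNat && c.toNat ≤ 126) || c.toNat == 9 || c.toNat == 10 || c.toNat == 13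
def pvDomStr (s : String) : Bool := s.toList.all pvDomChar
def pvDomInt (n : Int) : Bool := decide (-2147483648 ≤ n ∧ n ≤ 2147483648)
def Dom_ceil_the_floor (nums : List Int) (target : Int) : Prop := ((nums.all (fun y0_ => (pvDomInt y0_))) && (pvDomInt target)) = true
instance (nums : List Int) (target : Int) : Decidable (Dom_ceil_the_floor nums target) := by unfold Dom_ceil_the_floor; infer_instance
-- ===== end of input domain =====

-- B sorts the array once and locates floor/ceil with two hand-written binary searches (a
-- different algorithm); return-value equivalence is proved outside D_, where A's -1 sentinel
-- is confused with a genuine value -1.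

-- ===== PORT A =====
def ceil_the_floor (nums : List Int) (target : Int) : List Int :=
  -- floor = -1; ceil = -1; for num in nums: two conditional updates; return [floor, ceil]
  let st := nums.foldl (fun (st : Int × Int) num =>
      (if num ≤ target then (if st.1 = -1 ∨ num > st.1 then num else st.1) else st.1,
       if num ≥ target then (if st.2 = -1 ∨ num < st.2 then num else st.2) else st.2))
    (-1, -1)
  [st.1, st.2]

-- ===== PORT B =====
-- used only for the termination of the two binary-search loops
lemma bsearch_mid_bounds {lo hi : Int} (h : lo < hi) :
    lo ≤ PySem.Int.floordiv (lo + hi) 2 ∧ PySem.Int.floordiv (lo + hi) 2 < hi := by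
  unfold PySem.Int.floordiv
  rw [Int.fdiv_eq_ediv]
  omega

-- Source B's first while loop: first index in s with s[i] >= t (indices always in range, so
-- '(pyGet? …).getD 0' is exactly Python's s[mid] here)
def bsearchL (s : List Int) (t : Int) (lo hi : Int) : Int :=
  if h : lo < hi then
    if (PySem.List.pyGet? s (PySem.Int.floordiv (lo + hi) 2)).getD 0 < t then
      bsearchL s t (PySem.Int.floordiv (lo + hi) 2 + 1) hi
    else bsearchL s t lo (PySem.Int.floordiv (lo + hi) 2)
  else lo
termination_by (hi - lo).toNat
decreasing_by
  · have := bsearch_mid_bounds h; omega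
  · have := bsearch_mid_bounds h; omega

-- Source B's second while loop: first index in s with s[i] > t
def bsearchR (s : List Int) (t : Int) (lo hi : Int) : Int :=
  if h : lo < hi then
    if (PySem.List.pyGet? s (PySem.Int.floordiv (lo + hi) 2)).getD 0 ≤ t then
      bsearchR s t (PySem.Int.floordiv (lo + hi) 2 + 1) hi
    else bsearchR s t lo (PySem.Int.floordiv (lo + hi) 2)
  else lo
termination_by (hi - lo).toNat
decreasing_by
  · have := bsearch_mid_bounds h; omega
  · have := bsearch_mid_bounds h; omega

def ceil_the_floor_alt (nums : List Int) (target : Int) : List Int :=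
  let s := PySem.List.sorted nums (fun x => x) false
  let n : Int := s.length
  let lo := bsearchL s target 0 n
  let ceil := if lo < n then (PySem.List.pyGet? s lo).getD 0 else -1
  let lo2 := bsearchR s target 0 n
  let floor := if 0 < lo2 then (PySem.List.pyGet? s (lo2 - 1)).getD 0 else -1
  [floor, ceil]

-- ===== PRECONDITION & SPEC =====
-- the elements of l strictly after the last occurrence of -1 (all of l if -1 does not occur)
def lastSeg (l : List Int) : List Int :=
  l.foldl (fun acc v => if v = -1 then [] else acc ++ [v]) []

-- On arrays containing -1 whose elements after the last -1 go strictly past -1 towards target's far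
-- side while no element lies strictly between -1 and target, A confuses the value -1 with its unset
-- sentinel and returns a stale extreme (e.g. A([-1,-2],0)=[-2,-1]); B returns the true floor/ceil
-- ([-1,-1]), which is the intended value.
def D_ceil_the_floor (nums : List Int) (target : Int) : Prop :=
  ((-1 : Int) ∈ nums) ∧
    ((-1 ≤ target ∧ (∃ x ∈ lastSeg nums, x < -1) ∧ (∀ x ∈ nums, x ≤ target → ¬((-1 : Int) < x)))
     ∨ (target ≤ -1 ∧ (∃ x ∈ lastSeg nums, -1 < x) ∧ (∀ x ∈ nums, target ≤ x → ¬(x < -1))))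
instance (nums : List Int) (target : Int) : Decidable (D_ceil_the_floor nums target) := by
  unfold D_ceil_the_floor; infer_instance

def Spec_ceil_the_floor (nums : List Int) (target : Int) (out : List Int) : Prop :=
  ¬ D_ceil_the_floor nums target → out = ceil_the_floor_alt nums target
instance (nums : List Int) (target : Int) (out : List Int) : Decidable (Spec_ceil_the_floor nums target out) := by
  unfold Spec_ceil_the_floor; infer_instance

def pvDiffWitness_ceil_the_floor : List Int × Int := ([-1, -2], 0)
def pvDiffWitnessOut_ceil_the_floor : (List Int) × (List Int) := ([-2, -1], [-1, -1])

-- ===== CLAIM (what is proved, stated in full; the proofs are below) =====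
def Claim_unchanged_ceil_the_floor : Prop := ∀ (nums : List Int) (target : Int), Dom_ceil_the_floor nums target → Spec_ceil_the_floor nums target (ceil_the_floor nums target)
def Claim_changed_ceil_the_floor : Prop := Dom_ceil_the_floor (pvDiffWitness_ceil_the_floor.1) (pvDiffWitness_ceil_the_floor.2) ∧ D_ceil_the_floor (pvDiffWitness_ceil_the_floor.1) (pvDiffWitness_ceil_the_floor.2) ∧ ceil_the_floor (pvDiffWitness_ceil_the_floor.1) (pvDiffWitness_ceil_the_floor.2) = pvDiffWitnessOut_ceil_the_floor.1 ∧ ceil_the_floor_alt (pvDiffWitness_ceil_the_floor.1) (pvDiffWitness_ceil_the_floor.2) = pvDiffWitnessOut_ceil_the_floor.2 ∧ pvDiffWitnessOut_ceil_the_floor.1 ≠ pvDiffWitnessOut_ceil_the_floor.2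
def Claim_exact_ceil_the_floor : Prop := ∀ (nums : List Int) (target : Int), Dom_ceil_the_floor nums target → D_ceil_the_floor nums target → ceil_the_floor nums target ≠ ceil_the_floor_alt nums target

-- ===== LEMMAS AND PROOFS =====

-- the two components of A's fused fold, separated
def stepF (t f v : Int) : Int := if v ≤ t then (if f = -1 ∨ v > f then v else f) else f
def stepC (t c v : Int) : Int := if v ≥ t then (if c = -1 ∨ v < c then v else c) else c

lemma pairFold (t : Int) (l : List Int) (a b : Int) :
    l.foldl (fun (st : Int × Int) num =>
      (if num ≤ t then (if st.1 = -1 ∨ num > st.1 then num else st.1) else st.1,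
       if num ≥ t then (if st.2 = -1 ∨ num < st.2 then num else st.2) else st.2)) (a, b)
    = (l.foldl (stepF t) a, l.foldl (stepC t) b) := by
  induction l generalizing a b with
  | nil => rfl
  | cons v l ih => simpa [stepF, stepC] using ih (stepF t a v) (stepC t b v)

lemma A_eq (nums : List Int) (t : Int) :
    ceil_the_floor nums t = [nums.foldl (stepF t) (-1), nums.foldl (stepC t) (-1)] := by
  show [(nums.foldl _ ((-1 : Int), (-1 : Int))).1, (nums.foldl _ ((-1 : Int), (-1 : Int))).2] = _
  rw [pairFold]

-- max / min of an Int list, as an Option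
def omax? : List Int → Option Int
  | [] => none
  | x :: xs => some (xs.foldl max x)
def omin? : List Int → Option Int
  | [] => none
  | x :: xs => some (xs.foldl min x)

lemma omax?_snoc (l : List Int) (v : Int) :
    omax? (l ++ [v]) = some (match omax? l with | none => v | some m => max m v) := by
  cases l with
  | nil => rfl
  | cons x xs => simp [omax?, List.foldl_append]

lemma omin?_snoc (l : List Int) (v : Int) :
    omin? (l ++ [v]) = some (match omin? l with | none => v | some m => min m v) := by
  cases l with
  | nil => rfl
  | cons x xs => simp [omin?, List.foldl_append]

lemma foldl_max_mem : ∀ (xs : List Int) (x : Int), xs.foldl max x ∈ x :: xs := by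
  intro xs
  induction xs with
  | nil => intro x; simp
  | cons y ys ih =>
      intro x
      have h := ih (max x y)
      rcases max_choice x y with h1 | h1 <;> rcases List.mem_cons.1 h with h2 | h2 <;>
        simp_all [List.mem_cons]
lemma foldl_min_mem : ∀ (xs : List Int) (x : Int), xs.foldl min x ∈ x :: xs := by
  intro xs
  induction xs with
  | nil => intro x; simp
  | cons y ys ih =>
      intro x
      have h := ih (min x y)
      rcases min_choice x y with h1 | h1 <;> rcases List.mem_cons.1 h with h2 | h2 <;>
        simp_all [List.mem_cons]

lemma omax?_mem {l : List Int} {m : Int} (h : omax? l = some m) : m ∈ l := by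
  cases l with
  | nil => simp [omax?] at h
  | cons x xs =>
      simp [omax?] at h
      subst h
      exact foldl_max_mem xs x
lemma omin?_mem {l : List Int} {m : Int} (h : omin? l = some m) : m ∈ l := by
  cases l with
  | nil => simp [omin?] at h
  | cons x xs =>
      simp [omin?] at h
      subst h
      exact foldl_min_mem xs x

lemma le_foldl_max : ∀ (xs : List Int) (x : Int), x ≤ xs.foldl max x ∧ ∀ y ∈ xs, y ≤ xs.foldl max x := by
  intro xs
  induction xs with
  | nil => intro x; simp
  | cons y ys ih =>
      intro x
      obtain ⟨h1, h2⟩ := ih (max x y)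
      refine ⟨le_trans (le_max_left x y) h1, ?_⟩
      intro z hz
      rcases List.mem_cons.1 hz with rfl | hz
      · exact le_trans (le_max_right x z) h1
      · exact h2 z hz
lemma foldl_min_le : ∀ (xs : List Int) (x : Int), xs.foldl min x ≤ x ∧ ∀ y ∈ xs, xs.foldl min x ≤ y := by
  intro xs
  induction xs with
  | nil => intro x; simp
  | cons y ys ih =>
      intro x
      obtain ⟨h1, h2⟩ := ih (min x y)
      refine ⟨le_trans h1 (min_le_left x y), ?_⟩
      intro z hz
      rcases List.mem_cons.1 hz with rfl | hz
      · exact le_trans h1 (min_le_right x z)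
      · exact h2 z hz

lemma omax?_le {l : List Int} {m : Int} (h : omax? l = some m) : ∀ x ∈ l, x ≤ m := by
  cases l with
  | nil => simp [omax?] at h
  | cons x xs =>
      simp [omax?] at h
      subst h
      intro y hy
      rcases List.mem_cons.1 hy with rfl | hy
      · exact (le_foldl_max xs y).1
      · exact (le_foldl_max xs x).2 y hy
lemma omin?_le {l : List Int} {m : Int} (h : omin? l = some m) : ∀ x ∈ l, m ≤ x := by
  cases l with
  | nil => simp [omin?] at h
  | cons x xs =>
      simp [omin?] at h
      subst h
      intro y hy
      rcases List.mem_cons.1 hy with rfl | hy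
      · exact (foldl_min_le xs y).1
      · exact (foldl_min_le xs x).2 y hy

-- value characterizations: omax?/omin? of a nonempty list is its unique extremal value
lemma omax?_eq_some_of {l : List Int} {c : Int} (hc : c ∈ l) (hmax : ∀ x ∈ l, x ≤ c) :
    omax? l = some c := by
  rcases hm : omax? l with _ | m
  · cases l with
    | nil => simp at hc
    | cons x xs => simp [omax?] at hm
  · have h1 : m ∈ l := omax?_mem hm
    have h2 : c ≤ m := omax?_le hm c hc
    have h3 : m ≤ c := hmax m h1
    rw [le_antisymm h3 h2]
lemma omin?_eq_some_of {l : List Int} {c : Int} (hc : c ∈ l) (hmin : ∀ x ∈ l, c ≤ x) :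
    omin? l = some c := by
  rcases hm : omin? l with _ | m
  · cases l with
    | nil => simp at hc
    | cons x xs => simp [omin?] at hm
  · have h1 : m ∈ l := omin?_mem hm
    have h2 : m ≤ c := omin?_le hm c hc
    have h3 : c ≤ m := hmin m h1
    rw [le_antisymm h2 h3]

lemma lastSeg_snoc (l : List Int) (v : Int) :
    lastSeg (l ++ [v]) = if v = -1 then [] else lastSeg l ++ [v] := by
  simp [lastSeg, List.foldl_append]

lemma lastSeg_aux_mem {x : Int} : ∀ (l : List Int) (acc : List Int),
    x ∈ l.foldl (fun acc v => if v = -1 then [] else acc ++ [v]) acc → x ∈ acc ∨ x ∈ l := by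
  intro l
  induction l with
  | nil => intro acc h; exact Or.inl h
  | cons v l ih =>
      intro acc h
      simp only [List.foldl_cons] at h
      by_cases hv : v = -1
      · rw [if_pos hv] at h
        rcases ih _ h with h1 | h1
        · simp at h1
        · exact Or.inr (List.mem_cons_of_mem _ h1)
      · rw [if_neg hv] at h
        rcases ih _ h with h1 | h1
        · rcases List.mem_append.1 h1 with h2 | h2
          · exact Or.inl h2
          · simp at h2; exact Or.inr (by simp [h2])
        · exact Or.inr (List.mem_cons_of_mem _ h1)

lemma lastSeg_subset {x : Int} {l : List Int} (h : x ∈ lastSeg l) : x ∈ l := by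
  rcases lastSeg_aux_mem l [] h with h1 | h1
  · simp at h1
  · exact h1

lemma neg_one_not_mem_lastSeg : ∀ (l : List Int) (acc : List Int), (-1 : Int) ∉ acc →
    (-1 : Int) ∉ l.foldl (fun acc v => if v = -1 then [] else acc ++ [v]) acc := by
  intro l
  induction l with
  | nil => intro acc h; exact h
  | cons v l ih =>
      intro acc h
      by_cases hv : v = -1
      · exact ih _ (by simp [hv])
      · exact ih _ (by simp [hv, h]; omega)

lemma not_mem_lastSeg (l : List Int) : (-1 : Int) ∉ lastSeg l :=
  neg_one_not_mem_lastSeg l [] (by simp)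

-- characterization of A's floor / ceil components
def fSpec (t : Int) (l : List Int) : Int :=
  match omax? (l.filter (fun x => decide (x ≤ t))) with
  | none => -1
  | some M =>
      if M = -1 then
        (match omax? ((lastSeg l).filter (fun x => decide (x ≤ t))) with
         | none => -1
         | some m2 => m2)
      else M

def cSpec (t : Int) (l : List Int) : Int :=
  match omin? (l.filter (fun x => decide (t ≤ x))) with
  | none => -1
  | some M =>
      if M = -1 then
        (match omin? ((lastSeg l).filter (fun x => decide (t ≤ x))) with
         | none => -1
         | some m2 => m2)
      else M

lemma runF_eq (t : Int) (l : List Int) : l.foldl (stepF t) (-1) = fSpec t l := by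
  induction l using List.reverseRecOn with
  | nil => rfl
  | append_singleton l v ih =>
      rw [List.foldl_append, List.foldl_cons, List.foldl_nil, ih]
      have hfl : (l ++ [v]).filter (fun x => decide (x ≤ t)) =
          l.filter (fun x => decide (x ≤ t)) ++ (if v ≤ t then [v] else []) := by
        by_cases hv : v ≤ t <;> simp [List.filter_append, hv]
      by_cases hv : v ≤ t
      · rw [if_pos hv] at hfl
        rcases hm : omax? (l.filter (fun x => decide (x ≤ t))) with _ | M
        · have hnil : l.filter (fun x => decide (x ≤ t)) = [] := by
            cases h : l.filter (fun x => decide (x ≤ t)) with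
            | nil => rfl
            | cons a as => rw [h] at hm; simp [omax?] at hm
          have h1 : fSpec t l = -1 := by simp [fSpec, hm]
          rw [h1]
          have h2 : stepF t (-1) v = v := by simp [stepF, hv]
          rw [h2]
          simp only [fSpec, hfl, hnil, List.nil_append]
          by_cases hv1 : v = -1
          · simp [omax?, hv1, lastSeg_snoc]
          · simp [omax?, hv1]
        · have hsn : omax? ((l ++ [v]).filter (fun x => decide (x ≤ t))) = some (max M v) := by
            rw [hfl, omax?_snoc, hm]
          by_cases hM1 : M = -1
          · subst hM1
            rcases hi : omax? ((lastSeg l).filter (fun x => decide (x ≤ t))) with _ | M2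
            · have h1 : fSpec t l = -1 := by simp [fSpec, hm, hi]
              rw [h1]
              have h2 : stepF t (-1) v = v := by simp [stepF, hv]
              rw [h2]
              simp only [fSpec, hsn]
              by_cases hv1 : v = -1
              · subst hv1; simp [lastSeg_snoc, omax?]
              · by_cases hvg : (-1 : Int) < v
                · have : max (-1) v = v := by omega
                  rw [this, if_neg hv1]
                · have hvlt : v < -1 := by omega
                  have : max (-1) v = -1 := by omega
                  rw [this, if_pos rfl, lastSeg_snoc, if_neg hv1]
                  have : (lastSeg l ++ [v]).filter (fun x => decide (x ≤ t)) =
                      (lastSeg l).filter (fun x => decide (x ≤ t)) ++ [v] := by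
                    simp [List.filter_append, hv]
                  rw [this, omax?_snoc, hi]
            · have hm2f : M2 ∈ (lastSeg l).filter (fun x => decide (x ≤ t)) := omax?_mem hi
              have hm2seg : M2 ∈ lastSeg l := List.mem_of_mem_filter hm2f
              have hm2t : M2 ≤ t := by have := List.of_mem_filter hm2f; simpa using this
              have hm2l : M2 ∈ l := lastSeg_subset hm2seg
              have hm2M : M2 ≤ -1 := omax?_le hm M2 (List.mem_filter.2 ⟨hm2l, by simpa using hm2t⟩)
              have hm2ne : M2 ≠ -1 := fun h => not_mem_lastSeg l (h ▸ hm2seg)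
              have hm2lt : M2 < -1 := lt_of_le_of_ne hm2M hm2ne
              have h1 : fSpec t l = M2 := by simp [fSpec, hm, hi]
              rw [h1]
              simp only [fSpec, hsn]
              by_cases hv1 : v = -1
              · subst hv1
                simp only [lastSeg_snoc]
                have : max (-1 : Int) (-1) = -1 := by omega
                rw [this, if_pos rfl]
                have : stepF t M2 (-1) = -1 := by simp [stepF, hv, hm2ne]; omega
                rw [this]
                simp [omax?]
              · by_cases hvg : (-1 : Int) < v
                · have : max (-1) v = v := by omega
                  rw [this, if_neg hv1]
                  simp [stepF, hv]; omega
                · have hvlt : v < -1 := by omega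
                  have : max (-1) v = -1 := by omega
                  rw [this, if_pos rfl, lastSeg_snoc, if_neg hv1]
                  have : (lastSeg l ++ [v]).filter (fun x => decide (x ≤ t)) =
                      (lastSeg l).filter (fun x => decide (x ≤ t)) ++ [v] := by
                    simp [List.filter_append, hv]
                  rw [this, omax?_snoc, hi]
                  simp [stepF, hv, hm2ne, max_def]
                  split_ifs <;> omega
          · have h1 : fSpec t l = M := by simp [fSpec, hm, hM1]
            rw [h1]
            simp only [fSpec, hsn]
            by_cases hmv : max M v = -1
            · have hMle : M ≤ -1 := by omega
              have hMlt : M < -1 := lt_of_le_of_ne hMle hM1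
              have hv1 : v = -1 := by omega
              subst hv1
              rw [if_pos hmv, lastSeg_snoc, if_pos rfl]
              simp only [List.filter_nil]
              have : stepF t M (-1) = -1 := by simp [stepF, hv, hM1]; omega
              rw [this]
              simp [omax?]
            · rw [if_neg hmv]
              simp [stepF, hv, hM1]
              omega
      · rw [if_neg hv] at hfl
        simp only [List.append_nil] at hfl
        have hstep : stepF t (fSpec t l) v = fSpec t l := by simp [stepF, hv]
        rw [hstep]
        simp only [fSpec, hfl]
        rcases hm : omax? (l.filter (fun x => decide (x ≤ t))) with _ | M
        · rfl
        · by_cases hM1 : M = -1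
          · subst hM1
            have hmem : (-1 : Int) ∈ l.filter (fun x => decide (x ≤ t)) := omax?_mem hm
            have ht : (-1 : Int) ≤ t := by have := List.of_mem_filter hmem; simpa using this
            have hv1 : v ≠ -1 := by intro h; subst h; exact hv ht
            rw [lastSeg_snoc, if_neg hv1]
            have : (lastSeg l ++ [v]).filter (fun x => decide (x ≤ t)) =
                (lastSeg l).filter (fun x => decide (x ≤ t)) := by
              simp [List.filter_append, hv]
            rw [this]
          · simp [hM1]

lemma runC_eq (t : Int) (l : List Int) : l.foldl (stepC t) (-1) = cSpec t l := by
  induction l using List.reverseRecOn with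
  | nil => rfl
  | append_singleton l v ih =>
      rw [List.foldl_append, List.foldl_cons, List.foldl_nil, ih]
      have hfl : (l ++ [v]).filter (fun x => decide (t ≤ x)) =
          l.filter (fun x => decide (t ≤ x)) ++ (if t ≤ v then [v] else []) := by
        by_cases hv : t ≤ v <;> simp [List.filter_append, hv]
      by_cases hv : t ≤ v
      · rw [if_pos hv] at hfl
        rcases hm : omin? (l.filter (fun x => decide (t ≤ x))) with _ | M
        · have hnil : l.filter (fun x => decide (t ≤ x)) = [] := by
            cases h : l.filter (fun x => decide (t ≤ x)) with
            | nil => rfl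
            | cons a as => rw [h] at hm; simp [omin?] at hm
          have h1 : cSpec t l = -1 := by simp [cSpec, hm]
          rw [h1]
          have h2 : stepC t (-1) v = v := by simp [stepC, hv]
          rw [h2]
          simp only [cSpec, hfl, hnil, List.nil_append]
          by_cases hv1 : v = -1
          · simp [omin?, hv1, lastSeg_snoc]
          · simp [omin?, hv1]
        · have hsn : omin? ((l ++ [v]).filter (fun x => decide (t ≤ x))) = some (min M v) := by
            rw [hfl, omin?_snoc, hm]
          by_cases hM1 : M = -1
          · subst hM1
            rcases hi : omin? ((lastSeg l).filter (fun x => decide (t ≤ x))) with _ | M2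
            · have h1 : cSpec t l = -1 := by simp [cSpec, hm, hi]
              rw [h1]
              have h2 : stepC t (-1) v = v := by simp [stepC, hv]
              rw [h2]
              simp only [cSpec, hsn]
              by_cases hv1 : v = -1
              · subst hv1; simp [lastSeg_snoc, omin?]
              · by_cases hvg : v < -1
                · have : min (-1) v = v := by omega
                  rw [this, if_neg hv1]
                · have hvgt : (-1 : Int) < v := by omega
                  have : min (-1) v = -1 := by omega
                  rw [this, if_pos rfl, lastSeg_snoc, if_neg hv1]
                  have : (lastSeg l ++ [v]).filter (fun x => decide (t ≤ x)) =
                      (lastSeg l).filter (fun x => decide (t ≤ x)) ++ [v] := by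
                    simp [List.filter_append, hv]
                  rw [this, omin?_snoc, hi]
            · have hm2f : M2 ∈ (lastSeg l).filter (fun x => decide (t ≤ x)) := omin?_mem hi
              have hm2seg : M2 ∈ lastSeg l := List.mem_of_mem_filter hm2f
              have hm2t : t ≤ M2 := by have := List.of_mem_filter hm2f; simpa using this
              have hm2l : M2 ∈ l := lastSeg_subset hm2seg
              have hm2M : -1 ≤ M2 := omin?_le hm M2 (List.mem_filter.2 ⟨hm2l, by simpa using hm2t⟩)
              have hm2ne : M2 ≠ -1 := fun h => not_mem_lastSeg l (h ▸ hm2seg)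
              have hm2gt : -1 < M2 := lt_of_le_of_ne hm2M (Ne.symm hm2ne)
              have h1 : cSpec t l = M2 := by simp [cSpec, hm, hi]
              rw [h1]
              simp only [cSpec, hsn]
              by_cases hv1 : v = -1
              · subst hv1
                simp only [lastSeg_snoc]
                have : min (-1 : Int) (-1) = -1 := by omega
                rw [this, if_pos rfl]
                have : stepC t M2 (-1) = -1 := by simp [stepC, hv, hm2ne]; omega
                rw [this]
                simp [omin?]
              · by_cases hvg : v < -1
                · have : min (-1) v = v := by omega
                  rw [this, if_neg hv1]
                  simp [stepC, hv]; omega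
                · have hvgt : (-1 : Int) < v := by omega
                  have : min (-1) v = -1 := by omega
                  rw [this, if_pos rfl, lastSeg_snoc, if_neg hv1]
                  have : (lastSeg l ++ [v]).filter (fun x => decide (t ≤ x)) =
                      (lastSeg l).filter (fun x => decide (t ≤ x)) ++ [v] := by
                    simp [List.filter_append, hv]
                  rw [this, omin?_snoc, hi]
                  simp [stepC, hv, hm2ne, min_def]
                  split_ifs <;> omega
          · have h1 : cSpec t l = M := by simp [cSpec, hm, hM1]
            rw [h1]
            simp only [cSpec, hsn]
            by_cases hmv : min M v = -1
            · have hMge : -1 ≤ M := by omega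
              have hMgt : -1 < M := lt_of_le_of_ne hMge (Ne.symm hM1)
              have hv1 : v = -1 := by omega
              subst hv1
              rw [if_pos hmv, lastSeg_snoc, if_pos rfl]
              simp only [List.filter_nil]
              have : stepC t M (-1) = -1 := by simp [stepC, hv, hM1]; omega
              rw [this]
              simp [omin?]
            · rw [if_neg hmv]
              simp [stepC, hv, hM1]
              omega
      · rw [if_neg hv] at hfl
        simp only [List.append_nil] at hfl
        have hstep : stepC t (cSpec t l) v = cSpec t l := by simp [stepC, hv]
        rw [hstep]
        simp only [cSpec, hfl]
        rcases hm : omin? (l.filter (fun x => decide (t ≤ x))) with _ | M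
        · rfl
        · by_cases hM1 : M = -1
          · subst hM1
            have hmem : (-1 : Int) ∈ l.filter (fun x => decide (t ≤ x)) := omin?_mem hm
            have ht : t ≤ (-1 : Int) := by have := List.of_mem_filter hmem; simpa using this
            have hv1 : v ≠ -1 := by intro h; subst h; exact hv ht
            rw [lastSeg_snoc, if_neg hv1]
            have : (lastSeg l ++ [v]).filter (fun x => decide (t ≤ x)) =
                (lastSeg l).filter (fun x => decide (t ≤ x)) := by
              simp [List.filter_append, hv]
            rw [this]
          · simp [hM1]

-- ===== B-side lemmas: characterizing the binary searches =====

lemma pyGet_getD (s : List Int) (i : Int) (h0 : 0 ≤ i) (h : i.toNat < s.length) :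
    (PySem.List.pyGet? s i).getD 0 = s[i.toNat] := by
  have hi : i = ((i.toNat : Nat) : Int) := by omega
  have h1 : PySem.List.pyGet? s i = some (s[i.toNat]) := by
    conv_lhs => rw [hi]
    rw [PySem.List.pyGet?_natCast, List.getElem?_eq_getElem h]
  rw [h1]
  rfl

lemma pairwise_getElem_mono {s : List Int} (hpw : List.Pairwise (· ≤ ·) s)
    {i j : Nat} (hij : i ≤ j) (hj : j < s.length) : s[i]'(by omega) ≤ s[j] := by
  rcases lt_or_eq_of_le hij with h | h
  · exact List.pairwise_iff_getElem.1 hpw i j (by omega) hj h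
  · subst h; exact le_refl _

lemma bsearchL_spec (s : List Int) (t : Int) (hpw : List.Pairwise (· ≤ ·) s) :
    ∀ (k : Nat) (lo hi : Int), (hi - lo).toNat = k →
    0 ≤ lo → lo ≤ hi → hi ≤ (s.length : Int) →
    (∀ (j : Nat) (hj : j < s.length), (j : Int) < lo → s[j] < t) →
    (∀ (j : Nat) (hj : j < s.length), hi ≤ (j : Int) → t ≤ s[j]) →
    0 ≤ bsearchL s t lo hi ∧ bsearchL s t lo hi ≤ (s.length : Int) ∧
    (∀ (j : Nat) (hj : j < s.length), (j : Int) < bsearchL s t lo hi → s[j] < t) ∧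
    (∀ (j : Nat) (hj : j < s.length), bsearchL s t lo hi ≤ (j : Int) → t ≤ s[j]) := by
  intro k
  induction k using Nat.strong_induction_on with
  | _ k ih =>
    intro lo hi hk h0 hlh hhn hL hR
    rw [bsearchL]
    by_cases h : lo < hi
    · rw [dif_pos h]
      have hmid := bsearch_mid_bounds h
      set mid := PySem.Int.floordiv (lo + hi) 2 with hmiddef
      have hmid0 : 0 ≤ mid := by omega
      have hmidlen : mid.toNat < s.length := by omega
      rw [pyGet_getD s mid hmid0 hmidlen]
      by_cases hc : s[mid.toNat] < t
      · rw [if_pos hc]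
        refine ih (hi - (mid + 1)).toNat (by omega) (mid + 1) hi rfl (by omega) (by omega) hhn
          ?_ hR
        intro j hj hjm
        have : (j : Int) ≤ mid := by omega
        calc s[j] ≤ s[mid.toNat] := pairwise_getElem_mono hpw (by omega) hmidlen
          _ < t := hc
      · rw [if_neg hc]
        refine ih (mid - lo).toNat (by omega) lo mid rfl h0 (by omega) (by omega) hL ?_
        intro j hj hjm
        have ht : t ≤ s[mid.toNat] := by omega
        calc t ≤ s[mid.toNat] := ht
          _ ≤ s[j] := pairwise_getElem_mono hpw (by omega) hj
    · rw [dif_neg h]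
      have : lo = hi := by omega
      exact ⟨h0, by omega, hL, fun j hj hji => hR j hj (by omega)⟩

lemma bsearchR_spec (s : List Int) (t : Int) (hpw : List.Pairwise (· ≤ ·) s) :
    ∀ (k : Nat) (lo hi : Int), (hi - lo).toNat = k →
    0 ≤ lo → lo ≤ hi → hi ≤ (s.length : Int) →
    (∀ (j : Nat) (hj : j < s.length), (j : Int) < lo → s[j] ≤ t) →
    (∀ (j : Nat) (hj : j < s.length), hi ≤ (j : Int) → t < s[j]) →
    0 ≤ bsearchR s t lo hi ∧ bsearchR s t lo hi ≤ (s.length : Int) ∧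
    (∀ (j : Nat) (hj : j < s.length), (j : Int) < bsearchR s t lo hi → s[j] ≤ t) ∧
    (∀ (j : Nat) (hj : j < s.length), bsearchR s t lo hi ≤ (j : Int) → t < s[j]) := by
  intro k
  induction k using Nat.strong_induction_on with
  | _ k ih =>
    intro lo hi hk h0 hlh hhn hL hR
    rw [bsearchR]
    by_cases h : lo < hi
    · rw [dif_pos h]
      have hmid := bsearch_mid_bounds h
      set mid := PySem.Int.floordiv (lo + hi) 2 with hmiddef
      have hmid0 : 0 ≤ mid := by omega
      have hmidlen : mid.toNat < s.length := by omega
      rw [pyGet_getD s mid hmid0 hmidlen]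
      by_cases hc : s[mid.toNat] ≤ t
      · rw [if_pos hc]
        refine ih (hi - (mid + 1)).toNat (by omega) (mid + 1) hi rfl (by omega) (by omega) hhn
          ?_ hR
        intro j hj hjm
        calc s[j] ≤ s[mid.toNat] := pairwise_getElem_mono hpw (by omega) hmidlen
          _ ≤ t := hc
      · rw [if_neg hc]
        refine ih (mid - lo).toNat (by omega) lo mid rfl h0 (by omega) (by omega) hL ?_
        intro j hj hjm
        have ht : t < s[mid.toNat] := by omega
        calc t < s[mid.toNat] := ht
          _ ≤ s[j] := pairwise_getElem_mono hpw (by omega) hj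
    · rw [dif_neg h]
      have : lo = hi := by omega
      exact ⟨h0, by omega, hL, fun j hj hji => hR j hj (by omega)⟩

lemma ceil_component (s nums : List Int) (t : Int)
    (hpw : List.Pairwise (· ≤ ·) s) (hmem : ∀ x, x ∈ s ↔ x ∈ nums) :
    (if bsearchL s t 0 (s.length : Int) < (s.length : Int)
     then (PySem.List.pyGet? s (bsearchL s t 0 (s.length : Int))).getD 0 else -1)
    = match omin? (nums.filter (fun x => decide (t ≤ x))) with | some m => m | none => -1 := by
  obtain ⟨hr0, hrlen, hlt, hge⟩ := bsearchL_spec s t hpw _ 0 (s.length : Int) rfl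
    (le_refl 0) (by positivity) (le_refl _)
    (fun j hj hji => by omega) (fun j hj hji => by omega)
  set r := bsearchL s t 0 (s.length : Int) with hrdef
  by_cases hcase : r < (s.length : Int)
  · rw [if_pos hcase]
    have hrl : r.toNat < s.length := by omega
    rw [pyGet_getD s r hr0 hrl]
    have hc_mem : s[r.toNat] ∈ nums := (hmem _).1 (List.getElem_mem hrl)
    have hc_ge : t ≤ s[r.toNat] := hge r.toNat hrl (by omega)
    have : omin? (nums.filter (fun x => decide (t ≤ x))) = some s[r.toNat] := by
      apply omin?_eq_some_of
      · exact List.mem_filter.2 ⟨hc_mem, by simpa using hc_ge⟩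
      · intro x hx
        have hxn : x ∈ nums := List.mem_of_mem_filter hx
        have hxt : t ≤ x := by have := List.of_mem_filter hx; simpa using this
        obtain ⟨i, hi, hieq⟩ := List.mem_iff_getElem.1 ((hmem x).2 hxn)
        subst hieq
        by_cases hir : (i : Int) < r
        · exact absurd (hlt i hi hir) (by omega)
        · exact pairwise_getElem_mono hpw (by omega) hi
    rw [this]
  · rw [if_neg hcase]
    have hempty : nums.filter (fun x => decide (t ≤ x)) = [] := by
      rw [List.filter_eq_nil_iff]
      intro x hx
      obtain ⟨i, hi, hieq⟩ := List.mem_iff_getElem.1 ((hmem x).2 hx)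
      subst hieq
      have : s[i] < t := hlt i hi (by omega)
      simp
      omega
    rw [hempty]
    rfl

lemma floor_component (s nums : List Int) (t : Int)
    (hpw : List.Pairwise (· ≤ ·) s) (hmem : ∀ x, x ∈ s ↔ x ∈ nums) :
    (if 0 < bsearchR s t 0 (s.length : Int)
     then (PySem.List.pyGet? s (bsearchR s t 0 (s.length : Int) - 1)).getD 0 else -1)
    = match omax? (nums.filter (fun x => decide (x ≤ t))) with | some m => m | none => -1 := by
  obtain ⟨hr0, hrlen, hle, hgt⟩ := bsearchR_spec s t hpw _ 0 (s.length : Int) rfl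
    (le_refl 0) (by positivity) (le_refl _)
    (fun j hj hji => by omega) (fun j hj hji => by omega)
  set r := bsearchR s t 0 (s.length : Int) with hrdef
  by_cases hcase : 0 < r
  · rw [if_pos hcase]
    have hrl : (r - 1).toNat < s.length := by omega
    rw [pyGet_getD s (r - 1) (by omega) hrl]
    have hc_mem : s[(r - 1).toNat] ∈ nums := (hmem _).1 (List.getElem_mem hrl)
    have hc_le : s[(r - 1).toNat] ≤ t := hle (r - 1).toNat hrl (by omega)
    have : omax? (nums.filter (fun x => decide (x ≤ t))) = some s[(r - 1).toNat] := by
      apply omax?_eq_some_of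
      · exact List.mem_filter.2 ⟨hc_mem, by simpa using hc_le⟩
      · intro x hx
        have hxn : x ∈ nums := List.mem_of_mem_filter hx
        have hxt : x ≤ t := by have := List.of_mem_filter hx; simpa using this
        obtain ⟨i, hi, hieq⟩ := List.mem_iff_getElem.1 ((hmem x).2 hxn)
        subst hieq
        by_cases hir : r ≤ (i : Int)
        · exact absurd (hgt i hi hir) (by omega)
        · exact pairwise_getElem_mono hpw (by omega) hrl
    rw [this]
  · rw [if_neg hcase]
    have hempty : nums.filter (fun x => decide (x ≤ t)) = [] := by
      rw [List.filter_eq_nil_iff]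
      intro x hx
      obtain ⟨i, hi, hieq⟩ := List.mem_iff_getElem.1 ((hmem x).2 hx)
      subst hieq
      have : t < s[i] := hgt i hi (by omega)
      simp
      omega
    rw [hempty]
    rfl

lemma B_eq (nums : List Int) (t : Int) :
    ceil_the_floor_alt nums t =
      [(match omax? (nums.filter (fun x => decide (x ≤ t))) with | some m => m | none => -1),
       (match omin? (nums.filter (fun x => decide (t ≤ x))) with | some m => m | none => -1)] := by
  have hpw : List.Pairwise (· ≤ ·) (PySem.List.sorted nums (fun x => x) false) := by
    simpa using PySem.List.sorted_pairwise nums (fun x => x)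
  have hmem : ∀ x, x ∈ PySem.List.sorted nums (fun x => x) false ↔ x ∈ nums :=
    fun x => (PySem.List.sorted_perm nums (fun x => x) false).mem_iff
  simp only [ceil_the_floor_alt]
  rw [floor_component _ nums t hpw hmem, ceil_component _ nums t hpw hmem]

-- ===== VERDICT (by name: the statement is the Claim_ definition above) =====
theorem ceil_the_floor_spec : Claim_unchanged_ceil_the_floor := by
  intro nums t _ hnd
  rw [A_eq, B_eq, runF_eq, runC_eq]
  have hfloor : fSpec t nums =
      (match omax? (nums.filter (fun x => decide (x ≤ t))) with | some m => m | none => -1) := by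
    rcases hm : omax? (nums.filter (fun x => decide (x ≤ t))) with _ | M
    · simp [fSpec, hm]
    · by_cases hM1 : M = -1
      · subst hM1
        rcases hi : omax? ((lastSeg nums).filter (fun x => decide (x ≤ t))) with _ | M2
        · simp [fSpec, hm, hi]
        · exfalso
          have hm2f : M2 ∈ (lastSeg nums).filter (fun x => decide (x ≤ t)) := omax?_mem hi
          have hm2seg : M2 ∈ lastSeg nums := List.mem_of_mem_filter hm2f
          have hm2t : M2 ≤ t := by have := List.of_mem_filter hm2f; simpa using this
          have hm2l : M2 ∈ nums := lastSeg_subset hm2seg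
          have hm2M : M2 ≤ -1 := omax?_le hm M2 (List.mem_filter.2 ⟨hm2l, by simpa using hm2t⟩)
          have hm2ne : M2 ≠ -1 := fun h => not_mem_lastSeg nums (h ▸ hm2seg)
          have hm2lt : M2 < -1 := lt_of_le_of_ne hm2M hm2ne
          have hmemf : (-1 : Int) ∈ nums.filter (fun x => decide (x ≤ t)) := omax?_mem hm
          have hmem : (-1 : Int) ∈ nums := List.mem_of_mem_filter hmemf
          have ht : (-1 : Int) ≤ t := by have := List.of_mem_filter hmemf; simpa using this
          exact hnd ⟨hmem, Or.inl ⟨ht, ⟨M2, hm2seg, hm2lt⟩, fun x hx hxt hgt => by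
            have : x ≤ -1 := omax?_le hm x (List.mem_filter.2 ⟨hx, by simpa using hxt⟩)
            omega⟩⟩
      · simp [fSpec, hm, hM1]
  have hceil : cSpec t nums =
      (match omin? (nums.filter (fun x => decide (t ≤ x))) with | some m => m | none => -1) := by
    rcases hm : omin? (nums.filter (fun x => decide (t ≤ x))) with _ | M
    · simp [cSpec, hm]
    · by_cases hM1 : M = -1
      · subst hM1
        rcases hi : omin? ((lastSeg nums).filter (fun x => decide (t ≤ x))) with _ | M2
        · simp [cSpec, hm, hi]
        · exfalso
          have hm2f : M2 ∈ (lastSeg nums).filter (fun x => decide (t ≤ x)) := omin?_mem hi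
          have hm2seg : M2 ∈ lastSeg nums := List.mem_of_mem_filter hm2f
          have hm2t : t ≤ M2 := by have := List.of_mem_filter hm2f; simpa using this
          have hm2l : M2 ∈ nums := lastSeg_subset hm2seg
          have hm2M : -1 ≤ M2 := omin?_le hm M2 (List.mem_filter.2 ⟨hm2l, by simpa using hm2t⟩)
          have hm2ne : M2 ≠ -1 := fun h => not_mem_lastSeg nums (h ▸ hm2seg)
          have hm2gt : -1 < M2 := lt_of_le_of_ne hm2M (Ne.symm hm2ne)
          have hmemf : (-1 : Int) ∈ nums.filter (fun x => decide (t ≤ x)) := omin?_mem hm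
          have hmem : (-1 : Int) ∈ nums := List.mem_of_mem_filter hmemf
          have ht : t ≤ (-1 : Int) := by have := List.of_mem_filter hmemf; simpa using this
          exact hnd ⟨hmem, Or.inr ⟨ht, ⟨M2, hm2seg, hm2gt⟩, fun x hx hxt hlt => by
            have : -1 ≤ x := omin?_le hm x (List.mem_filter.2 ⟨hx, by simpa using hxt⟩)
            omega⟩⟩
      · simp [cSpec, hm, hM1]
  rw [hfloor, hceil]

theorem ceil_the_floor_changed : Claim_changed_ceil_the_floor := by
  unfold Claim_changed_ceil_the_floor
  refine ⟨by decide, by decide, by decide, ?_, by decide⟩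
  rw [B_eq]
  decide

theorem ceil_the_floor_tight : Claim_exact_ceil_the_floor := by
  intro nums t _ hD
  rcases hD with ⟨hmem, hcase⟩
  rw [A_eq, B_eq, runF_eq, runC_eq]
  rcases hcase with ⟨ht, ⟨w, hwseg, hwlt⟩, hall⟩ | ⟨ht, ⟨w, hwseg, hwgt⟩, hall⟩
  · -- floor components differ
    have hmf : (-1 : Int) ∈ nums.filter (fun x => decide (x ≤ t)) :=
      List.mem_filter.2 ⟨hmem, by simpa using ht⟩
    rcases hm : omax? (nums.filter (fun x => decide (x ≤ t))) with _ | M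
    · exfalso
      cases h : nums.filter (fun x => decide (x ≤ t)) with
      | nil => rw [h] at hmf; simp at hmf
      | cons a as => rw [h] at hm; simp [omax?] at hm
    · have hM1 : M = -1 := by
        have h1 : -1 ≤ M := omax?_le hm (-1) hmf
        have h2 : M ∈ nums.filter (fun x => decide (x ≤ t)) := omax?_mem hm
        have h3 : M ∈ nums := List.mem_of_mem_filter h2
        have h4 : M ≤ t := by have := List.of_mem_filter h2; simpa using this
        have h5 := hall M h3 h4
        omega
      subst hM1
      have hwf : w ∈ (lastSeg nums).filter (fun x => decide (x ≤ t)) :=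
        List.mem_filter.2 ⟨hwseg, by simp; omega⟩
      rcases hi : omax? ((lastSeg nums).filter (fun x => decide (x ≤ t))) with _ | M2
      · exfalso
        cases h : (lastSeg nums).filter (fun x => decide (x ≤ t)) with
        | nil => rw [h] at hwf; simp at hwf
        | cons a as => rw [h] at hi; simp [omax?] at hi
      · have hm2seg : M2 ∈ lastSeg nums := List.mem_of_mem_filter (omax?_mem hi)
        have hm2ne : M2 ≠ -1 := fun h => not_mem_lastSeg nums (h ▸ hm2seg)
        have hA : fSpec t nums = M2 := by simp [fSpec, hm, hi]
        intro heq
        have h1 := List.head_eq_of_cons_eq heq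
        rw [hA] at h1
        simp at h1
        exact hm2ne h1
  · -- ceil components differ
    have hmf : (-1 : Int) ∈ nums.filter (fun x => decide (t ≤ x)) :=
      List.mem_filter.2 ⟨hmem, by simpa using ht⟩
    rcases hm : omin? (nums.filter (fun x => decide (t ≤ x))) with _ | M
    · exfalso
      cases h : nums.filter (fun x => decide (t ≤ x)) with
      | nil => rw [h] at hmf; simp at hmf
      | cons a as => rw [h] at hm; simp [omin?] at hm
    · have hM1 : M = -1 := by
        have h1 : M ≤ -1 := omin?_le hm (-1) hmf
        have h2 : M ∈ nums.filter (fun x => decide (t ≤ x)) := omin?_mem hm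
        have h3 : M ∈ nums := List.mem_of_mem_filter h2
        have h4 : t ≤ M := by have := List.of_mem_filter h2; simpa using this
        have h5 := hall M h3 h4
        omega
      subst hM1
      have hwf : w ∈ (lastSeg nums).filter (fun x => decide (t ≤ x)) :=
        List.mem_filter.2 ⟨hwseg, by simp; omega⟩
      rcases hi : omin? ((lastSeg nums).filter (fun x => decide (t ≤ x))) with _ | M2
      · exfalso
        cases h : (lastSeg nums).filter (fun x => decide (t ≤ x)) with
        | nil => rw [h] at hwf; simp at hwf
        | cons a as => rw [h] at hi; simp [omin?] at hi
      · have hm2seg : M2 ∈ lastSeg nums := List.mem_of_mem_filter (omin?_mem hi)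
        have hm2ne : M2 ≠ -1 := fun h => not_mem_lastSeg nums (h ▸ hm2seg)
        have hA : cSpec t nums = M2 := by simp [cSpec, hm, hi]
        intro heq
        have h1 := List.head_eq_of_cons_eq (List.tail_eq_of_cons_eq heq)
        rw [hA] at h1
        simp at h1
        exact hm2ne h1
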